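-- pv_equiv track=rewrite | github.com/chongliw/algorithm_py | Chongli_string_suffix.py | suffix_match
-- ===== SOURCE A (Python) =====
-- def suffix_match(my_string):
--     sz = len(my_string)
--     ch0 = my_string[0]
--     match = [i for i, ch in enumerate(my_string) if ch == ch0]
--     count = len(match)
--     for i in range(1, sz):
--         temp = []
--         ch = my_string[i]
--         for j in range(len(match)):
--             if match[j] + 1 < sz and my_string[match[j] + 1] == ch:
--                 temp.append(match[j] + 1)
--                 count += 1
--         match = temp
--     return(count)
-- ===== SOURCE B (Python) =====
-- def suffix_match(my_string):
--     # Sum over every start position of the longest common prefix of the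
--     # string with the suffix starting there (empty string -> 0).
--     n = len(my_string)
--     total = 0
--     for q in range(n):
--         k = 0
--         while q + k < n and my_string[q + k] == my_string[k]:
--             k += 1
--         total += k
--     return total
-- ===== Notes on version B (the rewrite author's own statement) =====
-- stated objective: simpler
-- what changed: Replaces A's sweep over prefix lengths that rebuilds a list of live match end-positions at each length with a direct per-start-position scan that sums the longest common prefix of the string with each of its suffixes.
import Mathlib
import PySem

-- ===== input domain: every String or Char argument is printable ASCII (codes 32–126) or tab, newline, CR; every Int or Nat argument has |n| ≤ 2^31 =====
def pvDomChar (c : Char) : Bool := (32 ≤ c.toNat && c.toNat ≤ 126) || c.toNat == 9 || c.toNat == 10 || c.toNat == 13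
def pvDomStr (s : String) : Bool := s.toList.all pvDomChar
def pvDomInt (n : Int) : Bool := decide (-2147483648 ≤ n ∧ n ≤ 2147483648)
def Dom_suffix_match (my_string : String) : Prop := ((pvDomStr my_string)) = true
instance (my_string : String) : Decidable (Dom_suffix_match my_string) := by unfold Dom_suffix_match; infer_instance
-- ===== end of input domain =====

-- B changes the traversal (per-start-position LCP scan instead of A's per-prefix-length
-- sweep of live match end-positions) for simplicity; same O(n^2) cost.

-- ===== PORT A =====
-- Literal port of A: match list of end indices per prefix length, rebuilt each outer step.
def suffix_match (my_string : String) : Int :=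
  let l := my_string.toList
  let sz : Int := l.length
  match PySem.Str.pyGet? my_string 0 with
  | none => 0  -- my_string[0] raises IndexError here; excluded by Pre_
  | some ch0 =>
    let mtch : List Int := ((PySem.List.enumerate l 0).filter (fun p => p.2 == ch0)).map (·.1)
    let count : Int := mtch.length
    let st :=
      (PySem.List.pyRange 1 sz 1).foldl (fun (st : List Int × Int) i =>
        let ch := PySem.List.pyGetD l i ' '
        -- inner loop: for j in range(len(match)) indexing match[j]
        st.1.foldl (fun (acc : List Int × Int) m =>
          if m + 1 < sz ∧ PySem.List.pyGetD l (m + 1) ' ' == ch then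
            (acc.1 ++ [m + 1], acc.2 + 1)
          else acc) ([], st.2)) (mtch, count)
    st.2

-- ===== PORT B =====
-- while q + k < n and my_string[q+k] == my_string[k]: k += 1   (indices provably in range)
def lcpAt (l : List Char) (q k : Nat) : Nat :=
  if h : q + k < l.length ∧ l.getD (q + k) ' ' = l.getD k ' ' then lcpAt l q (k + 1)
  else k
termination_by l.length - (q + k)
decreasing_by omega

def suffix_match_alt (my_string : String) : Int :=
  let l := my_string.toList
  ((List.range l.length).foldl (fun total q => total + lcpAt l q 0) 0 : Nat)

-- ===== PRECONDITION & SPEC =====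
-- Pre_ excludes only the empty string, where A raises IndexError at my_string[0].
def Pre_suffix_match (my_string : String) : Prop := my_string ≠ ""
instance (my_string : String) : Decidable (Pre_suffix_match my_string) := by
  unfold Pre_suffix_match; infer_instance
def pvWitness_suffix_match : String := "abab"

def Spec_suffix_match (my_string : String) (out : Int) : Prop := out = suffix_match_alt my_string
instance (my_string : String) (out : Int) : Decidable (Spec_suffix_match my_string out) := by
  unfold Spec_suffix_match; infer_instance

-- ===== CLAIM (what is proved, stated in full; the proofs are below) =====
def Claim_equal_suffix_match : Prop := ∀ (my_string : String), Dom_suffix_match my_string → Pre_suffix_match my_string → Spec_suffix_match my_string (suffix_match my_string)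

-- ===== LEMMAS AND PROOFS =====

-- length of the longest common prefix of two lists
def lcpL : List Char → List Char → Nat
  | a :: as, b :: bs => if a = b then lcpL as bs + 1 else 0
  | _, _ => 0

lemma lcpL_le_right : ∀ a b : List Char, lcpL a b ≤ b.length := by
  intro a
  induction a with
  | nil => intro b; simp [lcpL]
  | cons x as ih =>
    intro b; cases b with
    | nil => simp [lcpL]
    | cons y bs =>
      simp only [lcpL]
      split
      · simpa using Nat.succ_le_succ (ih bs)
      · simp

-- characterization: m ≤ lcpL a b  ↔  within both lengths and the first m entries agree
lemma le_lcpL_iff : ∀ (a b : List Char) (m : Nat),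
    m ≤ lcpL a b ↔ m ≤ a.length ∧ m ≤ b.length ∧ ∀ j < m, a.getD j ' ' = b.getD j ' ' := by
  intro a
  induction a with
  | nil =>
    intro b m; cases m <;> simp [lcpL]
  | cons x as ih =>
    intro b m
    cases b with
    | nil => cases m <;> simp [lcpL]
    | cons y bs =>
      cases m with
      | zero => simp
      | succ m =>
        rw [show lcpL (x :: as) (y :: bs) = if x = y then lcpL as bs + 1 else 0 from rfl]
        by_cases hxy : x = y
        · rw [if_pos hxy]; subst hxy
          constructor
          · intro h
            have h' := (ih bs m).mp (by omega)
            refine ⟨by simpa using Nat.succ_le_succ h'.1, by simpa using Nat.succ_le_succ h'.2.1, ?_⟩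
            intro j hj
            cases j with
            | zero => simp
            | succ j => simpa using h'.2.2 j (by omega)
          · intro ⟨h1, h2, h3⟩
            have : m ≤ lcpL as bs := by
              refine (ih bs m).mpr ⟨by simpa using h1, by simpa using h2, ?_⟩
              intro j hj
              simpa using h3 (j + 1) (by omega)
            omega
        · rw [if_neg hxy]
          constructor
          · intro h; omega
          · intro ⟨h1, h2, h3⟩
            exact absurd (by simpa using h3 0 (by omega)) hxy

-- lcpAt computes lcpL of the two suffixes
lemma lcpAt_eq (l : List Char) (q k : Nat) :
    lcpAt l q k = k + lcpL (l.drop (q + k)) (l.drop k) := by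
  fun_induction lcpAt l q k with
  | case1 k h ih =>
    obtain ⟨hlt, heq⟩ := h
    have hk : k < l.length := by omega
    have h1 : l.drop (q + k) = l[q + k] :: l.drop (q + k + 1) := (List.drop_eq_getElem_cons hlt)
    have h2 : l.drop k = l[k] :: l.drop (k + 1) := (List.drop_eq_getElem_cons hk)
    have hg1 : l.getD (q + k) ' ' = l[q + k] := List.getD_eq_getElem l ' ' hlt
    have hg2 : l.getD k ' ' = l[k] := List.getD_eq_getElem l ' ' hk
    rw [ih, h1, h2]
    simp only [lcpL]
    rw [if_pos (by rw [← hg1, ← hg2]; exact heq)]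
    have : q + (k + 1) = q + k + 1 := by omega
    rw [this]
    omega
  | case2 k h =>
    rcases Nat.lt_or_ge (q + k) l.length with hlt | hge
    · have hk : k < l.length := by omega
      have hne : l.getD (q + k) ' ' ≠ l.getD k ' ' := by
        intro hc; exact h ⟨hlt, hc⟩
      rw [List.drop_eq_getElem_cons hlt, List.drop_eq_getElem_cons hk]
      simp only [lcpL]
      rw [if_neg]
      · omega
      · rw [← List.getD_eq_getElem l ' ' hlt, ← List.getD_eq_getElem l ' ' hk]; exact hne
    · rw [List.drop_eq_nil_of_le hge]
      simp [lcpL]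

-- L l q : longest prefix of l occurring at position q
def Lq (l : List Char) (q : Nat) : Nat := lcpL (l.drop q) l

lemma lcpAt_zero (l : List Char) (q : Nat) : lcpAt l q 0 = Lq l q := by
  rw [lcpAt_eq]; simp [Lq]

-- start positions of occurrences of the prefix of length k
def starts (l : List Char) (k : Nat) : List Nat :=
  (List.range l.length).filter (fun q => decide (k ≤ Lq l q))

-- key pointwise step: extending an occurrence by one character
lemma Lq_succ_iff (l : List Char) (q i : Nat) (hq : q < l.length) :
    (i + 1 ≤ Lq l q) ↔ (i ≤ Lq l q ∧ q + i < l.length ∧ l.getD (q + i) ' ' = l.getD i ' ') := by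
  have hlen : (l.drop q).length = l.length - q := by simp
  have hget : ∀ j, (l.drop q).getD j ' ' = l.getD (q + j) ' ' := by
    intro j
    rcases Nat.lt_or_ge (q + j) l.length with hlt | hge
    · rw [List.getD_eq_getElem _ ' ' (by omega : j < (l.drop q).length),
        List.getD_eq_getElem _ ' ' hlt]
      simp
    · rw [List.getD_eq_default _ ' ' (by omega), List.getD_eq_default _ ' ' (by omega)]
  rw [Lq, le_lcpL_iff, le_lcpL_iff, hlen]
  constructor
  · intro ⟨h1, h2, h3⟩
    refine ⟨⟨by omega, by omega, fun j hj => h3 j (by omega)⟩, by omega, ?_⟩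
    have := h3 i (by omega)
    rwa [hget] at this
  · intro ⟨⟨h1, h2, h3⟩, h4, h5⟩
    refine ⟨by omega, by omega, ?_⟩
    intro j hj
    rcases Nat.lt_or_ge j i with hji | hji
    · exact h3 j hji
    · have : j = i := by omega
      subst this
      rw [hget]; exact h5

lemma starts_succ (l : List Char) (i : Nat) :
    starts l (i + 1)
      = (starts l i).filter (fun q => decide (q + i < l.length ∧ l.getD (q + i) ' ' = l.getD i ' ')) := by
  unfold starts
  rw [List.filter_filter]
  apply List.filter_congr
  intro q hq
  have hqlt : q < l.length := List.mem_range.mp hq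
  have hiff := Lq_succ_iff l q i hqlt
  apply Bool.eq_iff_iff.mpr
  simp only [Bool.and_eq_true, decide_eq_true_eq]
  rw [hiff]
  tauto

-- the A-side state after processing prefix length i (i ≥ 1): match ends and running count
def endsI (l : List Char) (i : Nat) : List Int :=
  (starts l i).map (fun q : Nat => (q : Int) + (i : Int) - 1)

def countI (l : List Char) (i : Nat) : Nat :=
  ∑ k ∈ Finset.Icc 1 i, (starts l k).length

-- generic inner-loop shape: append-and-count fold on a pair
lemma foldl_pair_append (ms : List Int) (p : Int → Prop) [DecidablePred p]
    (acc0 : List Int) (c : Int) :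
    ms.foldl (fun (acc : List Int × Int) m =>
        if p m then (acc.1 ++ [m + 1], acc.2 + 1) else acc) (acc0, c)
      = (acc0 ++ (ms.filter (fun m => decide (p m))).map (· + 1),
         c + ((ms.filter (fun m => decide (p m))).length : Int)) := by
  induction ms generalizing acc0 c with
  | nil => simp
  | cons m ms ih =>
    by_cases h : p m
    · simp only [List.foldl_cons, if_pos h, List.filter_cons, decide_eq_true h, ih]
      simp
      omega
    · simp only [List.foldl_cons, if_neg h, List.filter_cons, decide_eq_false h, ih]
      simp

-- pushing a filter through a map
lemma map_filter_comm (f : Nat → Int) (p : Int → Bool) (xs : List Nat) :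
    (xs.map f).filter p = (xs.filter (fun q => p (f q))).map f := by
  induction xs with
  | nil => simp
  | cons x xs ih =>
    simp only [List.map_cons, List.filter_cons, ih]
    by_cases h : p (f x) <;> simp [h]

-- one outer iteration (at index i ≥ 1) maps the state for length i to that for length i+1
lemma step_endsI (l : List Char) (i : Nat) (c : Int) :
    (endsI l i).foldl (fun (acc : List Int × Int) m =>
        if m + 1 < (l.length : Int) ∧
            PySem.List.pyGetD l (m + 1) ' ' == PySem.List.pyGetD l (i : Int) ' ' then
          (acc.1 ++ [m + 1], acc.2 + 1)
        else acc) ([], c)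
      = (endsI l (i + 1), c + ((starts l (i + 1)).length : Int)) := by
  rw [foldl_pair_append]
  have key : ∀ q : Nat, ((q : Int) + (i : Int) - 1) + 1 = ((q + i : Nat) : Int) := by
    intro q; push_cast; ring
  have hfil : (endsI l i).filter
        (fun m => decide (m + 1 < (l.length : Int) ∧
            PySem.List.pyGetD l (m + 1) ' ' == PySem.List.pyGetD l (i : Int) ' '))
      = (starts l (i + 1)).map (fun q : Nat => (q : Int) + (i : Int) - 1) := by
    unfold endsI
    rw [map_filter_comm]
    congr 1
    rw [starts_succ]
    apply List.filter_congr
    intro q hq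
    rw [key q]
    apply Bool.eq_iff_iff.mpr
    simp only [decide_eq_true_eq, PySem.List.pyGetD_natCast, beq_iff_eq]
    constructor
    · intro ⟨h1, h2⟩
      exact ⟨by exact_mod_cast h1, h2⟩
    · intro ⟨h1, h2⟩
      exact ⟨by exact_mod_cast h1, h2⟩
  rw [hfil]
  simp only [Prod.mk.injEq]
  refine ⟨?_, ?_⟩
  · rw [List.nil_append, List.map_map]
    unfold endsI
    apply List.map_congr_left
    intro q _
    simp only [Function.comp]
    push_cast
    ring
  · simp

lemma countI_succ (l : List Char) (i : Nat) (hi : 1 ≤ i) :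
    countI l (i + 1) = countI l i + (starts l (i + 1)).length := by
  unfold countI
  rw [Finset.sum_Icc_succ_top (by omega : 1 ≤ i + 1)]

-- the outer loop from index a forward, k iterations
lemma outer_loop (l : List Char) (k : Nat) : ∀ (a : Nat), 1 ≤ a →
    (PySem.List.pyRange (a : Int) ((a + k : Nat) : Int) 1).foldl
        (fun (st : List Int × Int) i =>
          st.1.foldl (fun (acc : List Int × Int) m =>
            if m + 1 < (l.length : Int) ∧
                PySem.List.pyGetD l (m + 1) ' ' == PySem.List.pyGetD l i ' ' then
              (acc.1 ++ [m + 1], acc.2 + 1)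
            else acc) ([], st.2))
        (endsI l a, (countI l a : Int))
      = (endsI l (a + k), (countI l (a + k) : Int)) := by
  induction k with
  | zero =>
    intro a ha
    rw [PySem.List.pyRange_one_eq_nil (by omega)]
    simp
  | succ k ih =>
    intro a ha
    have hcast : ((a + (k + 1) : Nat) : Int) = (a : Int) + (k + 1 : Nat) := by push_cast; ring
    rw [PySem.List.pyRange_one_cons (by push_cast; omega)]
    simp only [List.foldl_cons]
    have hstep := step_endsI l a ((countI l a : Int))
    rw [hstep]
    have hc : (countI l a : Int) + ((starts l (a + 1)).length : Int) = (countI l (a + 1) : Int) := by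
      rw [countI_succ l a ha]; push_cast; ring
    rw [hc]
    have harg : ((a : Int) + 1) = ((a + 1 : Nat) : Int) := by push_cast; ring
    have hend : ((a + (k + 1) : Nat) : Int) = (((a + 1) + k : Nat) : Int) := by push_cast; ring
    rw [harg, hend, ih (a + 1) (by omega)]
    have heq : a + 1 + k = a + (k + 1) := by omega
    rw [heq]

-- initial match list = starts l 1 (as Ints), provided my_string[0] = ch0
lemma init_match (l : List Char) (ch0 : Char) (h0 : l.getD 0 ' ' = ch0) :
    ((PySem.List.enumerate l 0).filter (fun p => p.2 == ch0)).map (·.1)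
      = endsI l 1 := by
  rw [PySem.List.enumerate_eq_map_pyRange (d := ' ')]
  rw [List.filter_map, List.map_map]
  have hlen : PySem.List.len l = (l.length : Int) := by simp
  have hpr : (PySem.List.pyRange 0 (PySem.List.len l) 1) = (List.range l.length).map (fun q : Nat => (q : Int)) := by
    rw [hlen, PySem.List.pyRange_one]
    simp
  rw [hpr, List.filter_map, List.map_map]
  unfold endsI starts
  have hfil : ((List.range l.length).filter
      (((fun p : Int × Char => p.2 == ch0) ∘ fun j => (j, PySem.List.pyGetD l j ' ')) ∘ fun q : Nat => (q : Int)))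
      = (List.range l.length).filter (fun q => decide (1 ≤ Lq l q)) := by
    apply List.filter_congr
    intro q hq
    have hqlt : q < l.length := List.mem_range.mp hq
    simp only [Function.comp]
    rw [PySem.List.pyGetD_natCast]
    apply Bool.eq_iff_iff.mpr
    simp only [beq_iff_eq, decide_eq_true_eq]
    rw [← h0]
    have h1 : (1 ≤ Lq l q) ↔ (q < l.length ∧ l.getD q ' ' = l.getD 0 ' ') := by
      have hx := Lq_succ_iff l q 0 hqlt
      simp only [Nat.zero_add, Nat.add_zero] at hx
      rw [hx]
      have hz : 0 ≤ Lq l q := Nat.zero_le _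
      constructor
      · intro ⟨_, h4, h5⟩; exact ⟨h4, h5⟩
      · intro ⟨h4, h5⟩; exact ⟨hz, h4, h5⟩
    rw [h1]
    constructor
    · intro h; exact ⟨hqlt, h⟩
    · intro h; exact h.2
  rw [hfil]
  apply List.map_congr_left
  intro q hq
  simp only [Function.comp]
  push_cast
  ring

-- counting swap: total over prefix lengths = total of Lq over positions
lemma countP_range_eq_sum (p : Nat → Bool) (n : Nat) :
    ((List.range n).filter p).length = ∑ q ∈ Finset.range n, (if p q then 1 else 0) := by
  induction n with
  | zero => simp
  | succ n ih =>
    rw [List.range_succ, List.filter_append, Finset.sum_range_succ, List.length_append, ih]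
    by_cases h : p n <;> simp [h]

lemma Lq_le (l : List Char) (q : Nat) : Lq l q ≤ l.length := lcpL_le_right _ _

lemma countI_total (l : List Char) :
    countI l l.length = ∑ q ∈ Finset.range l.length, Lq l q := by
  unfold countI starts
  calc ∑ k ∈ Finset.Icc 1 l.length, ((List.range l.length).filter (fun q => decide (k ≤ Lq l q))).length
      = ∑ k ∈ Finset.Icc 1 l.length, ∑ q ∈ Finset.range l.length, (if k ≤ Lq l q then 1 else 0) := by
        apply Finset.sum_congr rfl
        intro k _
        rw [countP_range_eq_sum]
        apply Finset.sum_congr rfl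
        intro q _
        by_cases h : k ≤ Lq l q <;> simp [h]
    _ = ∑ q ∈ Finset.range l.length, ∑ k ∈ Finset.Icc 1 l.length, (if k ≤ Lq l q then 1 else 0) :=
        Finset.sum_comm
    _ = ∑ q ∈ Finset.range l.length, Lq l q := by
        apply Finset.sum_congr rfl
        intro q _
        rw [Finset.sum_boole]
        have hle : Lq l q ≤ l.length := Lq_le l q
        have : (Finset.Icc 1 l.length).filter (fun k => k ≤ Lq l q) = Finset.Icc 1 (Lq l q) := by
          apply Finset.ext
          intro k
          simp only [Finset.mem_filter, Finset.mem_Icc]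
          omega
        rw [this]
        simp [Nat.card_Icc]

lemma sum_map_range (f : Nat → Nat) (n : Nat) :
    ((List.range n).map f).sum = ∑ q ∈ Finset.range n, f q := by
  induction n with
  | zero => simp
  | succ n ih => simp [List.range_succ, Finset.sum_range_succ, ih]

-- B's fold is the sum of Lq
lemma alt_eq_sum (l : List Char) :
    (List.range l.length).foldl (fun total q => total + lcpAt l q 0) 0
      = ∑ q ∈ Finset.range l.length, Lq l q := by
  have h1 : (List.range l.length).foldl (fun total q => total + lcpAt l q 0) 0
      = ((List.range l.length).map (fun q => lcpAt l q 0)).sum := by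
    rw [PySem.List.foldl_add_nat]
    simp
  rw [h1]
  have h2 : (List.range l.length).map (fun q => lcpAt l q 0)
      = (List.range l.length).map (fun q => Lq l q) := by
    apply List.map_congr_left
    intro q _
    exact lcpAt_zero l q
  rw [h2, sum_map_range]

-- ===== VERDICT (by name: the statement is the Claim_ definition above) =====
theorem suffix_match_spec : Claim_equal_suffix_match := by
  intro s _ hpre
  unfold Spec_suffix_match suffix_match suffix_match_alt
  have hne : s.toList ≠ [] := by
    intro hc
    exact hpre (String.toList_eq_nil_iff.mp hc)
  obtain ⟨a, as, hcons⟩ := List.exists_cons_of_ne_nil hne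
  have hpos : 1 ≤ s.toList.length := by rw [hcons]; simp
  have hget : PySem.Str.pyGet? s 0 = some (s.toList.getD 0 ' ') := by
    simp [PySem.Str.pyGet?, PySem.List.pyGet?, PySem.List.pyIdx?, hcons]
  rw [hget]
  simp only []
  rw [init_match s.toList (s.toList.getD 0 ' ') rfl]
  have hcount : (((endsI s.toList 1).length : Nat) : Int) = ((countI s.toList 1 : Nat) : Int) := by
    unfold countI endsI
    simp
  rw [hcount]
  have hfin : 1 + (s.toList.length - 1) = s.toList.length := by omega
  have hout := outer_loop s.toList (s.toList.length - 1) 1 (le_refl 1)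
  rw [hfin] at hout
  simp only [Nat.cast_one] at hout
  rw [hout, countI_total, alt_eq_sum]
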